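-- pv_equiv track=rewrite | github.com/skyfireitdiy/Jarvis | tests/jarvis_agent/test_sliding_window_compression.py | _create_messages
-- ===== SOURCE A (Python) =====
-- def _create_messages(
--     user_count: int, assistant_count: int, system_count: int = 1
-- ):
--     """创建测试消息列表"""
--     messages = []
--
--     # 添加系统消息
--     for i in range(system_count):
--         messages.append({"role": "system", "content": f"系统提示词{i}"})
--
--     # 添加交替的用户和助手消息
--     for i in range(max(user_count, assistant_count)):
--         if i < user_count:
--             messages.append({"role": "user", "content": f"user{i + 1}的内容"})
--         if i < assistant_count:
--             messages.append(
--                 {"role": "assistant", "content": f"assistant{i + 1}的内容"}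
--             )
--
--     return messages
-- ===== SOURCE B (Python) =====
-- def _create_messages(
--     user_count: int, assistant_count: int, system_count: int = 1
-- ):
--     """创建测试消息列表"""
--     systems = [
--         {"role": "system", "content": f"系统提示词{i}"} for i in range(system_count)
--     ]
--     users = [
--         {"role": "user", "content": f"user{i + 1}的内容"} for i in range(user_count)
--     ]
--     assistants = [
--         {"role": "assistant", "content": f"assistant{i + 1}的内容"}
--         for i in range(assistant_count)
--     ]
--     k = min(len(users), len(assistants))
--     paired = [m for pair in zip(users, assistants) for m in pair]
--     return systems + paired + users[k:] + assistants[k:]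
-- ===== Notes on version B (the rewrite author's own statement) =====
-- stated objective: alternative
-- what changed: B builds the system, user and assistant message lists as three independent comprehensions and merges the user/assistant strands via zip over the common prefix plus the leftover tail slices, instead of A's single index loop over range(max(...)) with two per-index guards.
import Mathlib
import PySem

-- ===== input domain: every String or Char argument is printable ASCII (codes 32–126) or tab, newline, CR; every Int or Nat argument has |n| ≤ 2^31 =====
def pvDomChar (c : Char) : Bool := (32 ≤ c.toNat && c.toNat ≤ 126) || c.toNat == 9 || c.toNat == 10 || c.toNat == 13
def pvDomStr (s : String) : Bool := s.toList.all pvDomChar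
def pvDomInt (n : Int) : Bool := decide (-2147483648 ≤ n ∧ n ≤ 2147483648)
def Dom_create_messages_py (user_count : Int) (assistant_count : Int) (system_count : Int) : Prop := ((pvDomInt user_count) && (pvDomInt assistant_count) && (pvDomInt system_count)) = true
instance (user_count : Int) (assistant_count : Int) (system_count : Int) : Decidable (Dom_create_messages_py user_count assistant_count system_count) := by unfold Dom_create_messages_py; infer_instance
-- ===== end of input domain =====

-- B builds the system/user/assistant strands as three independent comprehensions and merges
-- them by zip + leftover tails instead of A's single index loop with two guards (objective: alternative decomposition).

-- ===== PORT A =====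
-- the three message dicts (shared vocabulary of both ports)
def sysMsg (i : Int) : List (String × String) :=
  [("role", "system"), ("content", "系统提示词" ++ PySem.Int.toStr i)]
def userMsg (i : Int) : List (String × String) :=
  [("role", "user"), ("content", "user" ++ PySem.Int.toStr i ++ "的内容")]
def asstMsg (i : Int) : List (String × String) :=
  [("role", "assistant"), ("content", "assistant" ++ PySem.Int.toStr i ++ "的内容")]

def create_messages_py (user_count : Int) (assistant_count : Int) (system_count : Int) : List (List (String × String)) :=
  let messages : List (List (String × String)) := []
  -- for i in range(system_count): messages.append({"role": "system", ...})
  let messages := (PySem.List.pyRange 0 system_count 1).foldl (fun acc i => acc ++ [sysMsg i]) messages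
  -- for i in range(max(user_count, assistant_count)): two guarded appends
  (PySem.List.pyRange 0 (max user_count assistant_count) 1).foldl
    (fun acc i =>
      let acc := if i < user_count then acc ++ [userMsg (i + 1)] else acc
      if i < assistant_count then acc ++ [asstMsg (i + 1)] else acc)
    messages

-- ===== PORT B =====
def create_messages_py_alt (user_count : Int) (assistant_count : Int) (system_count : Int) : List (List (String × String)) :=
  let systems := (PySem.List.pyRange 0 system_count 1).map sysMsg
  let users := (PySem.List.pyRange 0 user_count 1).map (fun i => userMsg (i + 1))
  let assistants := (PySem.List.pyRange 0 assistant_count 1).map (fun i => asstMsg (i + 1))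
  let k : Int := min (PySem.List.len users) (PySem.List.len assistants)
  let paired := (users.zip assistants).flatMap (fun p => [p.1, p.2])
  systems ++ paired ++ PySem.List.slice users (some k) none ++ PySem.List.slice assistants (some k) none

-- ===== PRECONDITION & SPEC =====
def Spec_create_messages_py (user_count : Int) (assistant_count : Int) (system_count : Int) (out : List (List (String × String))) : Prop := out = create_messages_py_alt user_count assistant_count system_count
instance (user_count : Int) (assistant_count : Int) (system_count : Int) (out : List (List (String × String))) : Decidable (Spec_create_messages_py user_count assistant_count system_count out) := by unfold Spec_create_messages_py; infer_instance

-- ===== CLAIM (what is proved, stated in full; the proofs are below) =====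
def Claim_equal_create_messages_py : Prop := ∀ (user_count : Int) (assistant_count : Int) (system_count : Int), Dom_create_messages_py user_count assistant_count system_count → Spec_create_messages_py user_count assistant_count system_count (create_messages_py user_count assistant_count system_count)

-- ===== LEMMAS AND PROOFS =====

-- a guard 'k < m' that every index of range n satisfies (n ≤ m) can be dropped
theorem flatMap_range_if_lt {α : Type} (f : Nat → α) (n m : Nat) (h : n ≤ m) :
    (List.range n).flatMap (fun k => if k < m then [f k] else []) = (List.range n).map f := by
  induction n with
  | zero => simp
  | succ n ih =>
    rw [List.range_succ, List.flatMap_append, List.map_append, ih (by omega)]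
    simp [Nat.lt_of_succ_le h]

-- core: A's guarded index loop over range (max U A) = zip of the two strands plus the longer tail
theorem interleave_core {α : Type} : ∀ (U A : Nat) (fu fa : Nat → α),
    (List.range (max U A)).flatMap
        (fun k => (if k < U then [fu k] else []) ++ (if k < A then [fa k] else []))
      = (((List.range U).map fu).zip ((List.range A).map fa)).flatMap (fun p => [p.1, p.2])
        ++ ((List.range U).map fu).drop (min U A) ++ ((List.range A).map fa).drop (min U A)
  | 0, A, fu, fa => by
    simp [flatMap_range_if_lt fa A A le_rfl]
  | U + 1, 0, fu, fa => by
    simp only [Nat.max_zero, Nat.min_zero, Nat.not_lt_zero, if_false, List.append_nil,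
      List.range_zero, List.map_nil, List.zip_nil_right, List.flatMap_nil, List.nil_append,
      List.drop_zero, List.drop_nil, List.append_nil]
    exact flatMap_range_if_lt fu (U + 1) (U + 1) le_rfl
  | U + 1, A + 1, fu, fa => by
    have ih := interleave_core U A (fun k => fu (k + 1)) (fun k => fa (k + 1))
    have hmax : max (U + 1) (A + 1) = max U A + 1 := by omega
    have hmin : min (U + 1) (A + 1) = min U A + 1 := by omega
    rw [hmax, hmin, List.range_succ_eq_map, List.range_succ_eq_map, List.range_succ_eq_map]
    simp only [List.flatMap_cons, List.flatMap_map, List.map_cons, List.map_map,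
      List.zip_cons_cons, List.drop_succ_cons, Nat.succ_lt_succ_iff, Nat.zero_lt_succ,
      if_true, Function.comp_def]
    rw [ih]
    simp

-- ===== VERDICT (by name: the statement is the Claim_ definition above) =====
theorem create_messages_py_spec : Claim_equal_create_messages_py := by
  intro u a s _
  unfold Spec_create_messages_py create_messages_py create_messages_py_alt
  dsimp only
  have hfun : (fun (acc : List (List (String × String))) (i : Int) =>
      if i < a then (if i < u then acc ++ [userMsg (i + 1)] else acc) ++ [asstMsg (i + 1)]
      else (if i < u then acc ++ [userMsg (i + 1)] else acc))
      = fun acc i => acc ++ ((if i < u then [userMsg (i + 1)] else []) ++ (if i < a then [asstMsg (i + 1)] else [])) := by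
    funext acc i
    by_cases h1 : i < u <;> by_cases h2 : i < a <;> simp [h1, h2]
  rw [hfun, PySem.List.foldl_append_eq_flatMap, PySem.List.foldl_append_singleton_eq_map,
    List.nil_append]
  simp only [List.append_assoc]
  congr 1
  rw [PySem.List.pyRange_one 0 (max u a), PySem.List.pyRange_one 0 u, PySem.List.pyRange_one 0 a]
  simp only [sub_zero, zero_add, List.flatMap_map, List.map_map, Function.comp_def,
    PySem.List.len_eq, List.length_map, List.length_range]
  have hmax : (max u a).toNat = max u.toNat a.toNat := by omega
  have hmin : min ((u.toNat : Int)) ((a.toNat : Int)) = ((min u.toNat a.toNat : Nat) : Int) := by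
    omega
  rw [hmax, hmin, PySem.List.slice_from_natCast, PySem.List.slice_from_natCast]
  simp only [← Int.lt_toNat]
  simpa using interleave_core u.toNat a.toNat (fun k => userMsg ((k : Int) + 1))
    (fun k => asstMsg ((k : Int) + 1))
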